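-- pv_equiv track=rewrite | github.com/alevant1905/-blue-robot-middleware | blue/utils.py | _identify_action_type
-- ===== SOURCE A (Python) =====
-- from typing import Any, Dict, List, Optional, Tuple
--
-- def _identify_action_type(text: str) -> Optional[str]:
--     """Identify the action type from a text fragment."""
--     text = text.lower()
--
--     if any(w in text for w in ['play', 'put on', 'listen to', 'queue']):
--         if any(w in text for w in ['music', 'song', 'jazz', 'rock', 'pop', 'by ']):
--             return 'play_music'
--
--     if any(w in text for w in ['light', 'lamp', 'bright', 'dim']):
--         if any(w in text for w in ['turn', 'set', 'make', 'switch']):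
--             return 'control_lights'
--         if any(w in text for w in ['mood', 'scene', 'party', 'relax', 'romantic']):
--             return 'control_lights'
--
--     if any(w in text for w in ['pause', 'stop', 'skip', 'next', 'volume', 'louder', 'quieter']):
--         return 'control_music'
--
--     if 'weather' in text:
--         return 'get_weather'
--
--     if 'email' in text or 'inbox' in text:
--         if any(w in text for w in ['send', 'write', 'compose']):
--             return 'send_gmail'
--         if any(w in text for w in ['check', 'read', 'show']):
--             return 'read_gmail'
--         if any(w in text for w in ['reply', 'respond']):
--             return 'reply_gmail'
--
--     if any(w in text for w in ['see', 'look', 'photo', 'camera', 'picture']):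
--         return 'capture_camera'
--
--     if any(w in text for w in ['timer', 'remind', 'alarm']):
--         return 'set_timer'
--
--     return None
-- ===== SOURCE B (Python) =====
-- from typing import Optional
--
-- # All keywords the classifier knows, as one hash set (lengths 3..9).
-- _KEYWORDS = frozenset([
--     'play', 'put on', 'listen to', 'queue',
--     'music', 'song', 'jazz', 'rock', 'pop', 'by ',
--     'light', 'lamp', 'bright', 'dim',
--     'turn', 'set', 'make', 'switch',
--     'mood', 'scene', 'party', 'relax', 'romantic',
--     'pause', 'stop', 'skip', 'next', 'volume', 'louder', 'quieter',
--     'weather',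
--     'email', 'inbox',
--     'send', 'write', 'compose',
--     'check', 'read', 'show',
--     'reply', 'respond',
--     'see', 'look', 'photo', 'camera', 'picture',
--     'timer', 'remind', 'alarm',
-- ])
--
-- _PLAY = frozenset(['play', 'put on', 'listen to', 'queue'])
-- _MUSIC = frozenset(['music', 'song', 'jazz', 'rock', 'pop', 'by '])
-- _LIGHT = frozenset(['light', 'lamp', 'bright', 'dim'])
-- _LIGHT_VERB = frozenset(['turn', 'set', 'make', 'switch'])
-- _LIGHT_MOOD = frozenset(['mood', 'scene', 'party', 'relax', 'romantic'])
-- _MUSIC_CTRL = frozenset(['pause', 'stop', 'skip', 'next', 'volume', 'louder', 'quieter'])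
-- _WEATHER = frozenset(['weather'])
-- _MAIL = frozenset(['email', 'inbox'])
-- _SEND = frozenset(['send', 'write', 'compose'])
-- _READ = frozenset(['check', 'read', 'show'])
-- _REPLY = frozenset(['reply', 'respond'])
-- _CAMERA = frozenset(['see', 'look', 'photo', 'camera', 'picture'])
-- _TIMER = frozenset(['timer', 'remind', 'alarm'])
--
--
-- def _identify_action_type(text: str) -> Optional[str]:
--     """Identify the action type from a text fragment.
--
--     Single left-to-right scan of the text collecting every known keyword that
--     occurs (dictionary matching by hash lookup of each 3..9-char window), then
--     one flat decision chain over set intersections with the matched set.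
--     """
--     t = text.lower()
--     m = set()
--     for i in range(len(t)):
--         for L in range(3, 10):
--             frag = t[i:i + L]
--             if frag in _KEYWORDS:
--                 m.add(frag)
--     if m & _PLAY and m & _MUSIC:
--         return 'play_music'
--     if m & _LIGHT and (m & _LIGHT_VERB or m & _LIGHT_MOOD):
--         return 'control_lights'
--     if m & _MUSIC_CTRL:
--         return 'control_music'
--     if m & _WEATHER:
--         return 'get_weather'
--     if m & _MAIL and m & _SEND:
--         return 'send_gmail'
--     if m & _MAIL and m & _READ:
--         return 'read_gmail'
--     if m & _MAIL and m & _REPLY: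
--         return 'reply_gmail'
--     if m & _CAMERA:
--         return 'capture_camera'
--     if m & _TIMER:
--         return 'set_timer'
--     return None
-- ===== Notes on version B (the rewrite author's own statement) =====
-- stated objective: alternative
-- what changed: Instead of A's 13 separate any(keyword in text) substring sweeps inside a nested if-chain, B makes ONE left-to-right scan of the text collecting every known keyword into a set via hash lookups of each 3..9-character window, then decides with a flat chain of set intersections against constant keyword groups.
import Mathlib
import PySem

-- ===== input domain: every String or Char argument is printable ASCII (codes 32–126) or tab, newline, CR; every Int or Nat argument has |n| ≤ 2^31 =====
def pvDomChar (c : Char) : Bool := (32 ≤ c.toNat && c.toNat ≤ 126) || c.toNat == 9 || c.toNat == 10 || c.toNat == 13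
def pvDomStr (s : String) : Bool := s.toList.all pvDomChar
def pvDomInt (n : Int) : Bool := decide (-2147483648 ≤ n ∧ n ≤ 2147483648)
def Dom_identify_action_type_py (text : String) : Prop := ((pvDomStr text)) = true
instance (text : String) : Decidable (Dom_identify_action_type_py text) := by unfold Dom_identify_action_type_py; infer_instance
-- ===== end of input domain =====

-- B replaces A's 13 repeated any(substring)-sweeps by ONE left-to-right scan of the text that
-- collects every occurring keyword via hash-set lookups of each 3..9-char window, then a flat
-- decision chain over set intersections (objective: alternative algorithm, same result).

-- ===== PORT A =====
-- literal transliteration of the nested if-chain of _identify_action_type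
def identify_action_type_py (text : String) : Option String :=
  let t := PySem.Str.lower text
  if ["play", "put on", "listen to", "queue"].any (fun w => PySem.Str.isIn w t) then
    if ["music", "song", "jazz", "rock", "pop", "by "].any (fun w => PySem.Str.isIn w t) then
      some "play_music"
    else identify_action_type_py_rest1 t
  else identify_action_type_py_rest1 t
where
  identify_action_type_py_rest1 (t : String) : Option String :=
    if ["light", "lamp", "bright", "dim"].any (fun w => PySem.Str.isIn w t) then
      if ["turn", "set", "make", "switch"].any (fun w => PySem.Str.isIn w t) then
        some "control_lights"
      else if ["mood", "scene", "party", "relax", "romantic"].any (fun w => PySem.Str.isIn w t) then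
        some "control_lights"
      else identify_action_type_py_rest2 t
    else identify_action_type_py_rest2 t
  identify_action_type_py_rest2 (t : String) : Option String :=
    if ["pause", "stop", "skip", "next", "volume", "louder", "quieter"].any (fun w => PySem.Str.isIn w t) then
      some "control_music"
    else if PySem.Str.isIn "weather" t then
      some "get_weather"
    else if PySem.Str.isIn "email" t || PySem.Str.isIn "inbox" t then
      if ["send", "write", "compose"].any (fun w => PySem.Str.isIn w t) then
        some "send_gmail"
      else if ["check", "read", "show"].any (fun w => PySem.Str.isIn w t) then
        some "read_gmail"
      else if ["reply", "respond"].any (fun w => PySem.Str.isIn w t) then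
        some "reply_gmail"
      else identify_action_type_py_rest3 t
    else identify_action_type_py_rest3 t
  identify_action_type_py_rest3 (t : String) : Option String :=
    if ["see", "look", "photo", "camera", "picture"].any (fun w => PySem.Str.isIn w t) then
      some "capture_camera"
    else if ["timer", "remind", "alarm"].any (fun w => PySem.Str.isIn w t) then
      some "set_timer"
    else none

-- ===== PORT B =====
-- the keyword groups of Source B (frozensets; modelled as PySem.Set, all elements distinct)
def pvPLAY : PySem.Set String := ["play", "put on", "listen to", "queue"]
def pvMUSIC : PySem.Set String := ["music", "song", "jazz", "rock", "pop", "by "]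
def pvLIGHT : PySem.Set String := ["light", "lamp", "bright", "dim"]
def pvLIGHT_VERB : PySem.Set String := ["turn", "set", "make", "switch"]
def pvLIGHT_MOOD : PySem.Set String := ["mood", "scene", "party", "relax", "romantic"]
def pvMUSIC_CTRL : PySem.Set String := ["pause", "stop", "skip", "next", "volume", "louder", "quieter"]
def pvWEATHER : PySem.Set String := ["weather"]
def pvMAIL : PySem.Set String := ["email", "inbox"]
def pvSEND : PySem.Set String := ["send", "write", "compose"]
def pvREAD : PySem.Set String := ["check", "read", "show"]
def pvREPLY : PySem.Set String := ["reply", "respond"]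
def pvCAMERA : PySem.Set String := ["see", "look", "photo", "camera", "picture"]
def pvTIMER : PySem.Set String := ["timer", "remind", "alarm"]

-- _KEYWORDS: every keyword the classifier knows (lengths 3..9)
def pvKEYWORDS : PySem.Set String :=
  pvPLAY ++ pvMUSIC ++ pvLIGHT ++ pvLIGHT_VERB ++ pvLIGHT_MOOD ++ pvMUSIC_CTRL ++
  pvWEATHER ++ pvMAIL ++ pvSEND ++ pvREAD ++ pvREPLY ++ pvCAMERA ++ pvTIMER

-- the scan loop of Source B: for i in range(len(t)): for L in range(3,10): if t[i:i+L] in _KEYWORDS: m.add(...)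
def pvScan (t : String) : PySem.Set String :=
  (PySem.List.pyRange 0 (PySem.Str.len t) 1).foldl (fun m i =>
    (PySem.List.pyRange 3 10 1).foldl (fun m L =>
      let frag := PySem.Str.slice t (some i) (some (i + L))
      if PySem.Set.contains pvKEYWORDS frag then PySem.Set.add m frag else m) m)
    PySem.Set.empty

-- truthiness of 'm & g' in Python
def pvHit (m : PySem.Set String) (g : PySem.Set String) : Bool :=
  !(PySem.Set.inter m g).isEmpty

def identify_action_type_py_alt (text : String) : Option String :=
  let m := pvScan (PySem.Str.lower text)
  if pvHit m pvPLAY && pvHit m pvMUSIC then some "play_music"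
  else if pvHit m pvLIGHT && (pvHit m pvLIGHT_VERB || pvHit m pvLIGHT_MOOD) then some "control_lights"
  else if pvHit m pvMUSIC_CTRL then some "control_music"
  else if pvHit m pvWEATHER then some "get_weather"
  else if pvHit m pvMAIL && pvHit m pvSEND then some "send_gmail"
  else if pvHit m pvMAIL && pvHit m pvREAD then some "read_gmail"
  else if pvHit m pvMAIL && pvHit m pvREPLY then some "reply_gmail"
  else if pvHit m pvCAMERA then some "capture_camera"
  else if pvHit m pvTIMER then some "set_timer"
  else none

-- ===== PRECONDITION & SPEC =====
def Spec_identify_action_type_py (text : String) (out : Option String) : Prop := out = identify_action_type_py_alt text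
instance (text : String) (out : Option String) : Decidable (Spec_identify_action_type_py text out) := by unfold Spec_identify_action_type_py; infer_instance

-- ===== CLAIM (what is proved, stated in full; the proofs are below) =====
def Claim_equal_identify_action_type_py : Prop := ∀ (text : String), Dom_identify_action_type_py text → Spec_identify_action_type_py text (identify_action_type_py text)

-- ===== LEMMAS AND PROOFS =====

-- membership in a foldl of conditional Set.add steps
theorem pv_mem_foldl {β : Type} (Q : β → String → Prop) [∀ x w, Decidable (Q x w)]
    (step : PySem.Set String → β → PySem.Set String)
    (hstep : ∀ m x w, w ∈ step m x ↔ w ∈ m ∨ Q x w) :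
    ∀ (xs : List β) (m : PySem.Set String) (w : String),
      w ∈ xs.foldl step m ↔ w ∈ m ∨ ∃ x ∈ xs, Q x w := by
  intro xs
  induction xs with
  | nil => simp
  | cons x xs ih =>
    intro m w
    simp only [List.foldl_cons, ih, hstep, List.mem_cons]
    constructor
    · rintro ((h | h) | ⟨y, hy, hQ⟩)
      · exact Or.inl h
      · exact Or.inr ⟨x, Or.inl rfl, h⟩
      · exact Or.inr ⟨y, Or.inr hy, hQ⟩
    · rintro (h | ⟨y, (rfl | hy), hQ⟩)
      · exact Or.inl (Or.inl h)
      · exact Or.inl (Or.inr hQ)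
      · exact Or.inr ⟨y, hy, hQ⟩

theorem pv_mem_scan (t : String) (w : String) :
    w ∈ pvScan t ↔ w ∈ pvKEYWORDS ∧
      ∃ i ∈ PySem.List.pyRange 0 (PySem.Str.len t) 1,
        ∃ L ∈ PySem.List.pyRange 3 10 1, PySem.Str.slice t (some i) (some (i + L)) = w := by
  unfold pvScan
  rw [pv_mem_foldl
      (Q := fun i w => w ∈ pvKEYWORDS ∧ ∃ L ∈ PySem.List.pyRange 3 10 1,
        PySem.Str.slice t (some i) (some (i + L)) = w)]
  · constructor
    · rintro (h | ⟨i, hi, hk, L, hL, hfrag⟩)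
      · simp [PySem.Set.empty] at h
      · exact ⟨hk, i, hi, L, hL, hfrag⟩
    · rintro ⟨hk, i, hi, L, hL, hfrag⟩
      exact Or.inr ⟨i, hi, hk, L, hL, hfrag⟩
  · intro m i w
    rw [pv_mem_foldl (Q := fun L w =>
        w ∈ pvKEYWORDS ∧ PySem.Str.slice t (some i) (some (i + L)) = w)]
    · constructor
      · rintro (h | ⟨L, hL, hk, hfrag⟩)
        · exact Or.inl h
        · exact Or.inr ⟨hk, L, hL, hfrag⟩
      · rintro (h | ⟨hk, L, hL, hfrag⟩)
        · exact Or.inl h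
        · exact Or.inr ⟨L, hL, hk, hfrag⟩
    · intro m L w
      cases hk : PySem.Set.contains pvKEYWORDS (PySem.Str.slice t (some i) (some (i + L))) with
      | true =>
        simp only [hk, if_true, PySem.Set.mem_add]
        rw [PySem.Set.contains_iff] at hk
        constructor
        · rintro (h | rfl)
          · exact Or.inl h
          · exact Or.inr ⟨hk, rfl⟩
        · rintro (h | ⟨_, rfl⟩)
          · exact Or.inl h
          · exact Or.inr rfl
      | false =>
        simp only [hk, Bool.false_eq_true, if_false]
        constructor
        · exact Or.inl
        · rintro (h | ⟨hmem, rfl⟩)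
          · exact h
          · rw [← PySem.Set.contains_iff] at hmem
            rw [hmem] at hk
            exact absurd hk (by simp)

-- every keyword is nonempty and has length between 3 and 9
theorem pv_keyword_len : ∀ w ∈ pvKEYWORDS, 3 ≤ w.toList.length ∧ w.toList.length ≤ 9 := by
  decide

-- a keyword is collected by the scan iff it occurs as a substring
theorem pv_mem_scan_iff_isIn (t : String) (w : String) (hw : w ∈ pvKEYWORDS) :
    w ∈ pvScan t ↔ PySem.Str.isIn w t = true := by
  rw [pv_mem_scan]
  obtain ⟨hw3, hw9⟩ := pv_keyword_len w hw
  constructor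
  · rintro ⟨-, i, hi, L, hL, hfrag⟩
    rw [PySem.List.mem_pyRange_one] at hi hL
    obtain ⟨j, rfl⟩ : ∃ j : ℕ, i = (j : Int) := ⟨i.toNat, by omega⟩
    obtain ⟨k, rfl⟩ : ∃ k : ℕ, L = (k : Int) := ⟨L.toNat, by omega⟩
    rw [PySem.Str.isIn_iff_infix]
    have : (PySem.Str.slice t (some (j : Int)) (some ((j : Int) + (k : Int)))).toList
        = (t.toList.drop j).take k := by
      rw [PySem.Str.toList_slice, PySem.Chars.slice_eq_listSlice,
        PySem.List.slice_natCast_add]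
    rw [hfrag] at this
    exact List.IsInfix.trans (this ▸ List.take_prefix k (t.toList.drop j)).isInfix
      (List.drop_suffix j t.toList).isInfix
  · intro hin
    rw [PySem.Str.isIn_iff_infix, ← PySem.Chars.isIn_iff_infix,
      ← PySem.Chars.exists_prefix_drop_iff_isIn] at hin
    obtain ⟨j, hj⟩ := hin
    have hjlt : j < t.toList.length := by
      by_contra h
      rw [List.drop_eq_nil_of_le (by omega), List.prefix_nil] at hj
      rw [hj] at hw3
      simp at hw3
    refine ⟨hw, (j : Int), ?_, (w.toList.length : Int), ?_, ?_⟩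
    · rw [PySem.List.mem_pyRange_one]
      have : PySem.Str.len t = (t.toList.length : Int) := by
        simp [PySem.Str.len_eq]
      omega
    · rw [PySem.List.mem_pyRange_one]; omega
    · have hlist : (PySem.Str.slice t (some (j : Int))
          (some ((j : Int) + (w.toList.length : Int)))).toList
          = (t.toList.drop j).take w.toList.length := by
        rw [PySem.Str.toList_slice, PySem.Chars.slice_eq_listSlice,
          PySem.List.slice_natCast_add]
      have htake : (t.toList.drop j).take w.toList.length = w.toList := by
        rw [List.prefix_iff_eq_take] at hj
        exact hj.symm
      apply String.toList_injective
      rw [hlist, htake]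

-- a group intersection with the scan set is nonempty iff some group word occurs
theorem pv_hit_iff (t : String) (g : PySem.Set String) (hg : ∀ w ∈ g, w ∈ pvKEYWORDS) :
    pvHit (pvScan t) g = g.any (fun w => PySem.Str.isIn w t) := by
  unfold pvHit
  rcases hb : g.any (fun w => PySem.Str.isIn w t) with _ | _
  · simp only [List.any_eq_false] at hb
    simp only [Bool.not_eq_false']
    rw [List.isEmpty_iff, List.eq_nil_iff_forall_not_mem]
    intro w hwmem
    rw [PySem.Set.mem_inter] at hwmem
    obtain ⟨hscan, hgm⟩ := hwmem
    exact hb w hgm ((pv_mem_scan_iff_isIn t w (hg w hgm)).mp hscan)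
  · simp only [List.any_eq_true] at hb
    obtain ⟨w, hwg, hwin⟩ := hb
    simp only [Bool.not_eq_eq_eq_not, Bool.not_true]
    rw [List.isEmpty_eq_false_iff_exists_mem]
    exact ⟨w, (PySem.Set.mem_inter _ _ _).mpr ⟨(pv_mem_scan_iff_isIn t w (hg w hwg)).mpr hwin, hwg⟩⟩

-- ===== VERDICT (by name: the statement is the Claim_ definition above) =====
theorem identify_action_type_py_spec : Claim_equal_identify_action_type_py := by
  intro text _
  unfold Spec_identify_action_type_py identify_action_type_py identify_action_type_py_alt
  dsimp only
  set t := PySem.Str.lower text with ht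
  rw [pv_hit_iff t pvPLAY (by decide), pv_hit_iff t pvMUSIC (by decide),
    pv_hit_iff t pvLIGHT (by decide), pv_hit_iff t pvLIGHT_VERB (by decide),
    pv_hit_iff t pvLIGHT_MOOD (by decide), pv_hit_iff t pvMUSIC_CTRL (by decide),
    pv_hit_iff t pvWEATHER (by decide), pv_hit_iff t pvMAIL (by decide),
    pv_hit_iff t pvSEND (by decide), pv_hit_iff t pvREAD (by decide),
    pv_hit_iff t pvREPLY (by decide), pv_hit_iff t pvCAMERA (by decide),
    pv_hit_iff t pvTIMER (by decide)]
  simp only [identify_action_type_py.identify_action_type_py_rest1,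
    identify_action_type_py.identify_action_type_py_rest2,
    identify_action_type_py.identify_action_type_py_rest3,
    pvPLAY, pvMUSIC, pvLIGHT, pvLIGHT_VERB, pvLIGHT_MOOD, pvMUSIC_CTRL, pvWEATHER,
    pvMAIL, pvSEND, pvREAD, pvREPLY, pvCAMERA, pvTIMER,
    List.any_cons, List.any_nil, Bool.or_false]
  generalize (PySem.Str.isIn "play" t || (PySem.Str.isIn "put on" t || (PySem.Str.isIn "listen to" t || PySem.Str.isIn "queue" t))) = b1
  generalize (PySem.Str.isIn "music" t || (PySem.Str.isIn "song" t || (PySem.Str.isIn "jazz" t || (PySem.Str.isIn "rock" t || (PySem.Str.isIn "pop" t || PySem.Str.isIn "by " t))))) = b2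
  generalize (PySem.Str.isIn "light" t || (PySem.Str.isIn "lamp" t || (PySem.Str.isIn "bright" t || PySem.Str.isIn "dim" t))) = b3
  generalize (PySem.Str.isIn "turn" t || (PySem.Str.isIn "set" t || (PySem.Str.isIn "make" t || PySem.Str.isIn "switch" t))) = b4
  generalize (PySem.Str.isIn "mood" t || (PySem.Str.isIn "scene" t || (PySem.Str.isIn "party" t || (PySem.Str.isIn "relax" t || PySem.Str.isIn "romantic" t)))) = b5
  generalize (PySem.Str.isIn "pause" t || (PySem.Str.isIn "stop" t || (PySem.Str.isIn "skip" t || (PySem.Str.isIn "next" t || (PySem.Str.isIn "volume" t || (PySem.Str.isIn "louder" t || PySem.Str.isIn "quieter" t)))))) = b6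
  generalize (PySem.Str.isIn "weather" t) = b7
  generalize (PySem.Str.isIn "email" t || PySem.Str.isIn "inbox" t) = b8
  generalize (PySem.Str.isIn "send" t || (PySem.Str.isIn "write" t || PySem.Str.isIn "compose" t)) = b9
  generalize (PySem.Str.isIn "check" t || (PySem.Str.isIn "read" t || PySem.Str.isIn "show" t)) = b10
  generalize (PySem.Str.isIn "reply" t || PySem.Str.isIn "respond" t) = b11
  generalize (PySem.Str.isIn "see" t || (PySem.Str.isIn "look" t || (PySem.Str.isIn "photo" t || (PySem.Str.isIn "camera" t || PySem.Str.isIn "picture" t)))) = b12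
  generalize (PySem.Str.isIn "timer" t || (PySem.Str.isIn "remind" t || PySem.Str.isIn "alarm" t)) = b13
  revert b1 b2 b3 b4 b5 b6 b7 b8 b9 b10 b11 b12 b13; decide
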